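-- pv_equiv track=rewrite | github.com/whoaone/node-runner | node_runner/dialogs/selection.py | compress_ids_to_range_tuples
-- ===== SOURCE A (Python) =====
-- def compress_ids_to_range_tuples(sorted_ids):
--     """Compress a sorted iterable of ints into list of (start, end, step)
--     tuples. Single IDs are returned as (id, id, 1)."""
--     ids = list(sorted_ids)
--     if not ids:
--         return []
--     out = []
--     i = 0
--     n = len(ids)
--     while i < n:
--         start = ids[i]
--         if i + 1 >= n:
--             out.append((start, start, 1))
--             i += 1
--             continue
--         step = ids[i + 1] - start
--         if step <= 0:
--             out.append((start, start, 1))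
--             i += 1
--             continue
--         j = i + 1
--         while j < n and ids[j] - ids[j - 1] == step:
--             j += 1
--         end = ids[j - 1]
--         out.append((start, end, step))
--         i = j
--     return out
-- ===== SOURCE B (Python) =====
-- def compress_ids_to_range_tuples(sorted_ids):
--     """Compress a sorted iterable of ints into list of (start, end, step)
--     tuples. Single IDs are returned as (id, id, 1).
--
--     Single flat pass maintaining run state (start, last, step, count)
--     instead of index-juggled nested scans."""
--     out = []
--     start = last = step = None
--     count = 0
--     for x in sorted_ids:
--         if count == 0:
--             start = last = x
--             count = 1
--         elif count == 1:
--             d = x - last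
--             if d <= 0:
--                 out.append((start, start, 1))
--                 start = last = x
--                 count = 1
--             else:
--                 step = d
--                 last = x
--                 count = 2
--         else:
--             if x - last == step:
--                 last = x
--                 count += 1
--             else:
--                 out.append((start, last, step))
--                 start = last = x
--                 count = 1
--     if count == 1:
--         out.append((start, start, 1))
--     elif count >= 2:
--         out.append((start, last, step))
--     return out
-- ===== Notes on version B (the rewrite author's own statement) =====
-- stated objective: simpler
-- what changed: Replaces A's index-based outer while with a nested inner while scan (re-reading ids[j], ids[j-1] by index) by a single flat for-x-in-ids pass maintaining run state (start, last, step, count) and a final flush.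
import Mathlib
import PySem

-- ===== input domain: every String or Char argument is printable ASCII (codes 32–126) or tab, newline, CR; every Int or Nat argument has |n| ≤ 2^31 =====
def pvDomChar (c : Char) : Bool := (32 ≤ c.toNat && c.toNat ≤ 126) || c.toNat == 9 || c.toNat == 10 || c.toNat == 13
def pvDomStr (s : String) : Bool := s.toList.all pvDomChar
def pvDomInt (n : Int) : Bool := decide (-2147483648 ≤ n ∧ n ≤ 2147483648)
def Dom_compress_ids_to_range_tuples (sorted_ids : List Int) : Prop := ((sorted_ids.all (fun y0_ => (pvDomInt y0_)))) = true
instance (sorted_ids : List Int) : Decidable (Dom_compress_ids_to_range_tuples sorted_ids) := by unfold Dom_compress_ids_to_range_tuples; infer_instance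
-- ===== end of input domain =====

-- B replaces A's index-juggling outer/inner while loops by one flat pass with
-- run state (start, last, step, count); same return value (objective: simpler).

-- ===== PORT A =====
-- inner while loop: 'while j < n and ids[j] - ids[j-1] == step: j += 1'
def aInner (ids : List Int) (n : Nat) (step : Int) (j : Nat) : Nat :=
  if _h : j < n then
    if ids.getD j 0 - ids.getD (j - 1) 0 = step then aInner ids n step (j + 1) else j
  else j
termination_by n - j

theorem aInner_ge (ids : List Int) (n : Nat) (step : Int) (j : Nat) :
    j ≤ aInner ids n step j := by
  unfold aInner
  split
  · split
    · exact le_trans (Nat.le_succ j) (aInner_ge ids n step (j + 1))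
    · exact le_refl j
  · exact le_refl j
termination_by n - j

-- outer while loop over index i, accumulating out
def aOuter (ids : List Int) (n : Nat) (i : Nat) (out : List (Int × Int × Int)) :
    List (Int × Int × Int) :=
  if _h : i < n then
    let start := ids.getD i 0
    if i + 1 ≥ n then
      aOuter ids n (i + 1) (out ++ [(start, start, 1)])
    else
      let step := ids.getD (i + 1) 0 - start
      if step ≤ 0 then
        aOuter ids n (i + 1) (out ++ [(start, start, 1)])
      else
        let j := aInner ids n step (i + 1)
        aOuter ids n j (out ++ [(start, ids.getD (j - 1) 0, step)])
  else out
termination_by n - i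
decreasing_by
  · omega
  · omega
  · have h1 := aInner_ge ids n (ids.getD (i + 1) 0 - ids.getD i 0) (i + 1); omega

def compress_ids_to_range_tuples (sorted_ids : List Int) : List (Int × Int × Int) :=
  let ids := sorted_ids
  if ids = [] then [] else aOuter ids ids.length 0 []

-- ===== PORT B =====
-- one fold step of Source B's 'for x in sorted_ids' loop; the state is
-- (out, start, last, step, count); 0 stands for Python's never-read None.
def bStep (st : List (Int × Int × Int) × Int × Int × Int × Nat) (x : Int) :
    List (Int × Int × Int) × Int × Int × Int × Nat :=
  let (out, start, last, step, count) := st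
  if count = 0 then (out, x, x, step, 1)
  else if count = 1 then
    let d := x - last
    if d ≤ 0 then (out ++ [(start, start, 1)], x, x, step, 1)
    else (out, start, x, d, 2)
  else
    if x - last = step then (out, start, x, step, count + 1)
    else (out ++ [(start, last, step)], x, x, step, 1)

def compress_ids_to_range_tuples_alt (sorted_ids : List Int) : List (Int × Int × Int) :=
  let (out, start, last, step, count) := sorted_ids.foldl bStep ([], 0, 0, 0, 0)
  if count = 1 then out ++ [(start, start, 1)]
  else if count ≥ 2 then out ++ [(start, last, step)]
  else out

-- ===== PRECONDITION & SPEC =====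
def Spec_compress_ids_to_range_tuples (sorted_ids : List Int) (out : List (Int × Int × Int)) : Prop := out = compress_ids_to_range_tuples_alt sorted_ids
instance (sorted_ids : List Int) (out : List (Int × Int × Int)) : Decidable (Spec_compress_ids_to_range_tuples sorted_ids out) := by unfold Spec_compress_ids_to_range_tuples; infer_instance

-- ===== CLAIM (what is proved, stated in full; the proofs are below) =====
def Claim_equal_compress_ids_to_range_tuples : Prop := ∀ (sorted_ids : List Int), Dom_compress_ids_to_range_tuples sorted_ids → Spec_compress_ids_to_range_tuples sorted_ids (compress_ids_to_range_tuples sorted_ids)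

-- ===== LEMMAS AND PROOFS =====

-- reference function: the common meaning both loops compute
def run (step last : Int) : List Int → Int × List Int
  | [] => (last, [])
  | z :: rest => if z - last = step then run step z rest else (last, z :: rest)

theorem run_snd_length (step last : Int) (l : List Int) :
    (run step last l).2.length ≤ l.length := by
  induction l generalizing last with
  | nil => simp [run]
  | cons z rest ih =>
    simp only [run]
    split
    · exact le_trans (ih z) (Nat.le_succ _)
    · simp

def f : List Int → List (Int × Int × Int)
  | [] => []
  | [x] => [(x, x, 1)]
  | x :: y :: rest =>
    let step := y - x
    if step ≤ 0 then (x, x, 1) :: f (y :: rest)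
    else
      let p := run step y rest
      (x, p.1, step) :: f p.2
termination_by l => l.length
decreasing_by
  · simp
  · have := run_snd_length (y - x) y rest; simp; omega

theorem drop_cons_getD (l : List Int) (i : Nat) (h : i < l.length) :
    l.drop i = l.getD i 0 :: l.drop (i + 1) := by
  rw [List.getD_eq_getElem l 0 h]
  exact List.drop_eq_getElem_cons h

-- ===== A side: aInner/aOuter compute f on the dropped suffix =====

theorem aInner_run (ids : List Int) (step : Int) :
    ∀ (l : List Int) (prev : Int) (j : Nat), 1 ≤ j → ids.drop j = l →
      ids.getD (j - 1) 0 = prev →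
      ids.drop (aInner ids ids.length step j) = (run step prev l).2 ∧
      ids.getD (aInner ids ids.length step j - 1) 0 = (run step prev l).1 := by
  intro l
  induction l with
  | nil =>
    intro prev j hj hd hp
    have hn : ¬ j < ids.length := by
      have := congrArg List.length hd; simp at this; omega
    unfold aInner
    simp only [hn, dite_false]
    exact ⟨hd, by simpa [run] using hp⟩
  | cons z rest ih =>
    intro prev j hj hd hp
    have hlen := congrArg List.length hd
    simp at hlen
    have hjn : j < ids.length := by omega
    have hz : ids.getD j 0 = z := by
      rw [drop_cons_getD ids j hjn] at hd
      exact (List.cons.injEq _ _ _ _ ▸ hd).1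
    have hrest : ids.drop (j + 1) = rest := by
      rw [drop_cons_getD ids j hjn] at hd
      exact (List.cons.injEq _ _ _ _ ▸ hd).2
    unfold aInner
    simp only [hjn, dite_true]
    by_cases hc : ids.getD j 0 - ids.getD (j - 1) 0 = step
    · have hzp : z - prev = step := by rw [← hz, ← hp]; exact hc
      simp only [hc, if_true]
      have := ih z (j + 1) (by omega) hrest (by simp only [Nat.add_sub_cancel]; exact hz)
      simpa [run, hzp] using this
    · have hzp : ¬ z - prev = step := by rw [← hz, ← hp]; exact hc
      simp only [hc, if_false]
      exact ⟨by simpa [run, hzp] using hd, by simpa [run, hzp] using hp⟩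

theorem aOuter_f (ids : List Int) :
    ∀ (k : Nat) (l : List Int) (i : Nat) (out : List (Int × Int × Int)),
      l.length ≤ k → ids.drop i = l →
      aOuter ids ids.length i out = out ++ f l := by
  intro k
  induction k with
  | zero =>
    intro l i out hk hd
    have : l = [] := by cases l <;> simp_all
    subst this
    have hn : ¬ i < ids.length := by
      have := congrArg List.length hd; simp at this; omega
    unfold aOuter
    simp [hn, f]
  | succ k ih =>
    intro l i out hk hd
    match l with
    | [] =>
      have hn : ¬ i < ids.length := by
        have := congrArg List.length hd; simp at this; omega
      unfold aOuter
      simp [hn, f]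
    | [x] =>
      have hlen := congrArg List.length hd
      simp at hlen
      have hin : i < ids.length := by omega
      have hx : ids.getD i 0 = x := by
        rw [drop_cons_getD ids i hin] at hd
        exact (List.cons.injEq _ _ _ _ ▸ hd).1
      have hrest : ids.drop (i + 1) = [] := by
        rw [drop_cons_getD ids i hin] at hd
        exact (List.cons.injEq _ _ _ _ ▸ hd).2
      have h1 : i + 1 ≥ ids.length := by omega
      unfold aOuter
      simp only [hin, dite_true]
      rw [if_pos h1]
      rw [ih [] (i + 1) _ (by simp) hrest]
      rw [hx]; simp [f]
    | x :: y :: rest =>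
      have hlen := congrArg List.length hd
      simp at hlen
      have hin : i < ids.length := by omega
      have hx : ids.getD i 0 = x := by
        rw [drop_cons_getD ids i hin] at hd
        exact (List.cons.injEq _ _ _ _ ▸ hd).1
      have hrest1 : ids.drop (i + 1) = y :: rest := by
        rw [drop_cons_getD ids i hin] at hd
        exact (List.cons.injEq _ _ _ _ ▸ hd).2
      have hi1n : i + 1 < ids.length := by omega
      have hy : ids.getD (i + 1) 0 = y := by
        rw [drop_cons_getD ids (i + 1) hi1n] at hrest1
        exact (List.cons.injEq _ _ _ _ ▸ hrest1).1
      have hnot : ¬ i + 1 ≥ ids.length := by omega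
      unfold aOuter
      simp only [hin, dite_true, hnot, if_false, hx, hy]
      by_cases hs : y - x ≤ 0
      · rw [if_pos hs]
        rw [ih (y :: rest) (i + 1) _ (by simp at hk ⊢; omega) hrest1]
        simp only [f, hs, if_pos]
        simp
      · rw [if_neg hs]
        have hir := aInner_run ids (y - x) (y :: rest) x (i + 1) (by omega) hrest1
          (by simpa using hx)
        have hrun : run (y - x) x (y :: rest) = run (y - x) y rest := by
          simp [run]
        rw [hrun] at hir
        have hlr := run_snd_length (y - x) y rest
        rw [ih (run (y - x) y rest).2 (aInner ids ids.length (y - x) (i + 1)) _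
          (by simp at hk; omega) hir.1]
        rw [hir.2]
        simp only [f, hs, ite_false]
        simp

-- ===== B side: the fold computes f from either pending-run state =====

def bFinish (st : List (Int × Int × Int) × Int × Int × Int × Nat) :
    List (Int × Int × Int) :=
  let (out, start, last, step, count) := st
  if count = 1 then out ++ [(start, start, 1)]
  else if count ≥ 2 then out ++ [(start, last, step)]
  else out

theorem bStep_c0 (out : List (Int × Int × Int)) (s la st x : Int) :
    bStep (out, s, la, st, 0) x = (out, x, x, st, 1) := by
  simp [bStep]

theorem bStep_c1_neg (out : List (Int × Int × Int)) (s la st x : Int)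
    (h : x - la ≤ 0) : bStep (out, s, la, st, 1) x = (out ++ [(s, s, 1)], x, x, st, 1) := by
  simp [bStep, h]

theorem bStep_c1_pos (out : List (Int × Int × Int)) (s la st x : Int)
    (h : ¬ x - la ≤ 0) : bStep (out, s, la, st, 1) x = (out, s, x, x - la, 2) := by
  simp [bStep, h]

theorem bStep_big_eq (out : List (Int × Int × Int)) (s la st x : Int) (c : Nat)
    (hc : 2 ≤ c) (he : x - la = st) : bStep (out, s, la, st, c) x = (out, s, x, st, c + 1) := by
  have h0 : ¬ c = 0 := by omega
  have h1 : ¬ c = 1 := by omega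
  simp [bStep, h0, h1, he]

theorem bStep_big_ne (out : List (Int × Int × Int)) (s la st x : Int) (c : Nat)
    (hc : 2 ≤ c) (he : ¬ x - la = st) :
    bStep (out, s, la, st, c) x = (out ++ [(s, la, st)], x, x, st, 1) := by
  have h0 : ¬ c = 0 := by omega
  have h1 : ¬ c = 1 := by omega
  simp [bStep, h0, h1, he]

theorem bFold_f : ∀ (xs : List Int),
    (∀ (out : List (Int × Int × Int)) (s st : Int),
      bFinish (xs.foldl bStep (out, s, s, st, 1)) = out ++ f (s :: xs)) ∧
    (∀ (out : List (Int × Int × Int)) (s la st : Int) (c : Nat), 2 ≤ c →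
      bFinish (xs.foldl bStep (out, s, la, st, c)) =
        out ++ (s, (run st la xs).1, st) :: f (run st la xs).2) := by
  intro xs
  induction xs with
  | nil =>
    constructor
    · intro out s st
      simp [bFinish, f]
    · intro out s la st c hc
      have h1 : ¬ c = 1 := by omega
      simp [bFinish, run, h1, hc, f]
  | cons x rest ih =>
    constructor
    · intro out s st
      by_cases hd : x - s ≤ 0
      · rw [List.foldl_cons, bStep_c1_neg out s s st x hd]
        rw [ih.1 (out ++ [(s, s, 1)]) x st]
        have : (f (s :: x :: rest)) = (s, s, 1) :: f (x :: rest) := by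
          simp [f, hd]
        rw [this]; simp
      · rw [List.foldl_cons, bStep_c1_pos out s s st x hd]
        rw [ih.2 out s x (x - s) 2 (by omega)]
        have : f (s :: x :: rest) =
            (s, (run (x - s) x rest).1, x - s) :: f (run (x - s) x rest).2 := by
          rw [f]; simp [hd]
        rw [this]
    · intro out s la st c hc
      by_cases he : x - la = st
      · rw [List.foldl_cons, bStep_big_eq out s la st x c hc he]
        rw [ih.2 out s x st (c + 1) (by omega)]
        simp [run, he]
      · rw [List.foldl_cons, bStep_big_ne out s la st x c hc he]
        rw [ih.1 (out ++ [(s, la, st)]) x st]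
        simp [run, he]

theorem alt_eq_f (sorted_ids : List Int) :
    compress_ids_to_range_tuples_alt sorted_ids = f sorted_ids := by
  cases sorted_ids with
  | nil => simp [compress_ids_to_range_tuples_alt, f]
  | cons x rest =>
    have h : compress_ids_to_range_tuples_alt (x :: rest) =
        bFinish ((x :: rest).foldl bStep ([], 0, 0, 0, 0)) := by
      rfl
    rw [h]
    rw [List.foldl_cons, bStep_c0 [] 0 0 0 x]
    rw [(bFold_f rest).1 [] x 0]
    simp

theorem a_eq_f (sorted_ids : List Int) :
    compress_ids_to_range_tuples sorted_ids = f sorted_ids := by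
  unfold compress_ids_to_range_tuples
  by_cases h : sorted_ids = []
  · subst h; simp [f]
  · simp only [h, ite_false]
    rw [aOuter_f sorted_ids sorted_ids.length sorted_ids 0 [] (le_refl _)
      (by simp)]
    simp

-- ===== VERDICT (by name: the statement is the Claim_ definition above) =====
theorem compress_ids_to_range_tuples_spec : Claim_equal_compress_ids_to_range_tuples := by
  intro sorted_ids _
  unfold Spec_compress_ids_to_range_tuples
  rw [a_eq_f, alt_eq_f]
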